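-- pv_equiv track=rewrite | github.com/eroge-69/PyToExe | python-files/eciesse.py | choose_primary_prefix_nibble
-- ===== SOURCE A (Python) =====
-- from typing import List, Optional, Tuple
--
-- TARGET_PRIMARY = 0xF7
--
-- def sum_nibbles(b: int) -> int:
--     return ((b >> 4) & 0xF) + (b & 0xF)
--
-- def find_all_prefixes_for_want(want:int) -> List[int]:
--     res = []
--     for P in range(256):
--         if sum_nibbles(P) == want:
--             res.append(P)
--     return res
--
-- def choose_primary_prefix_nibble(data_bytes:List[int]) -> Optional[int]:
--     s_data = sum(sum_nibbles(b) for b in data_bytes)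
--     target_n = sum_nibbles(TARGET_PRIMARY)
--     want = target_n - s_data
--     if want < 0 or want > 30:
--         return None
--     candidates = find_all_prefixes_for_want(want)
--     if not candidates:
--         return None
--     return max(candidates)  # choose highest candidate (firmware-like heuristic)
-- ===== SOURCE B (Python) =====
-- def choose_primary_prefix_nibble(data_bytes):
--     # closed form: the largest byte with nibble-sum == want fills the high nibble first
--     want = 22 - sum(((b >> 4) & 0xF) + (b & 0xF) for b in data_bytes)
--     if want < 0 or want > 30:
--         return None
--     h = min(15, want)
--     return (h << 4) + (want - h)
-- ===== Notes on version B (the rewrite author's own statement) =====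
-- stated objective: simpler
-- what changed: Replaces the 256-byte candidate search plus max() with a closed-form greedy construction of the maximal byte (fill the high nibble first: h=min(15,want), result=(h<<4)+(want-h)).
import Mathlib
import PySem

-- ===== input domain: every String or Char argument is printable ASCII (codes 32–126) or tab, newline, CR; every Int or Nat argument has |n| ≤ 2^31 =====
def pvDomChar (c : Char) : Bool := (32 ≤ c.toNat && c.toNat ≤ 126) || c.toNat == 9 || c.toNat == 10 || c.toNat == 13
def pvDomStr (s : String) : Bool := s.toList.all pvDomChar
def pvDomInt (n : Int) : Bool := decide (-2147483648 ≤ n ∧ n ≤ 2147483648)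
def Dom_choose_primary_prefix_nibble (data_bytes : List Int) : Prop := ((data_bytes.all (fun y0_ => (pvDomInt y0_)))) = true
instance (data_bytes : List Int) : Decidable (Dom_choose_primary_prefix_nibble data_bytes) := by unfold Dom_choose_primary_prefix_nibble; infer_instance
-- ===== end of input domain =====

-- B replaces A's 256-byte candidate search + max() with a closed-form greedy maximal byte (simpler).
-- ===== PORT A =====
-- ((b >> 4) & 0xF) + (b & 0xF): for every Python int, b>>4 = b//16 and x & 0xF = x % 16 (two's complement),
-- so PySem.Int.floordiv/mod make this exact.
def pySumNibbles (b : Int) : Int :=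
  PySem.Int.mod (PySem.Int.floordiv b 16) 16 + PySem.Int.mod b 16

def pyFindAllPrefixesForWant (want : Int) : List Int :=
  (PySem.List.pyRange 0 256 1).foldl (fun res P => if pySumNibbles P = want then res ++ [P] else res) []

def choose_primary_prefix_nibble (data_bytes : List Int) : Option Int :=
  let s_data := data_bytes.foldl (fun acc b => acc + pySumNibbles b) 0
  let target_n := pySumNibbles 0xF7
  let want := target_n - s_data
  if want < 0 ∨ want > 30 then none
  else
    let candidates := pyFindAllPrefixesForWant want
    if candidates = [] then none
    else PySem.List.max? candidates (fun x => x)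

-- ===== PORT B =====
-- (h << 4) is h * 16 (h is a nonnegative small int here).
def choose_primary_prefix_nibble_alt (data_bytes : List Int) : Option Int :=
  let want := 22 - data_bytes.foldl (fun acc b => acc + (PySem.Int.mod (PySem.Int.floordiv b 16) 16 + PySem.Int.mod b 16)) 0
  if want < 0 ∨ want > 30 then none
  else
    let h := min 15 want
    some (h * 16 + (want - h))

-- ===== PRECONDITION & SPEC =====
def Spec_choose_primary_prefix_nibble (data_bytes : List Int) (out : Option Int) : Prop := out = choose_primary_prefix_nibble_alt data_bytes
instance (data_bytes : List Int) (out : Option Int) : Decidable (Spec_choose_primary_prefix_nibble data_bytes out) := by unfold Spec_choose_primary_prefix_nibble; infer_instance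

-- ===== CLAIM (what is proved, stated in full; the proofs are below) =====
def Claim_equal_choose_primary_prefix_nibble : Prop := ∀ (data_bytes : List Int), Dom_choose_primary_prefix_nibble data_bytes → Spec_choose_primary_prefix_nibble data_bytes (choose_primary_prefix_nibble data_bytes)

-- ===== LEMMAS AND PROOFS =====
set_option maxRecDepth 40000 in
theorem tail_eq (w : Int) (h1 : 0 ≤ w) (h2 : w ≤ 30) :
    (if pyFindAllPrefixesForWant w = [] then none
     else PySem.List.max? (pyFindAllPrefixesForWant w) (fun x => x))
    = some (min 15 w * 16 + (w - min 15 w)) := by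
  interval_cases w <;> decide

-- ===== VERDICT (by name: the statement is the Claim_ definition above) =====
theorem choose_primary_prefix_nibble_spec : Claim_equal_choose_primary_prefix_nibble := by
  intro data_bytes _
  unfold Spec_choose_primary_prefix_nibble
  simp only [choose_primary_prefix_nibble, choose_primary_prefix_nibble_alt, pySumNibbles]
  have h22 : PySem.Int.mod (PySem.Int.floordiv 247 16) 16 + PySem.Int.mod 247 16 = (22:Int) := by decide
  rw [h22]
  have hsd : 0 ≤ data_bytes.foldl (fun acc b => acc + (PySem.Int.mod (PySem.Int.floordiv b 16) 16 + PySem.Int.mod b 16)) 0 := by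
    have key : ∀ (l : List Int) (a : Int), 0 ≤ a →
        0 ≤ l.foldl (fun acc b => acc + (PySem.Int.mod (PySem.Int.floordiv b 16) 16 + PySem.Int.mod b 16)) a := by
      intro l
      induction l with
      | nil => intro a ha; simpa using ha
      | cons x t ih =>
        intro a ha
        simp only [List.foldl]
        apply ih
        have h1 : 0 ≤ PySem.Int.mod (PySem.Int.floordiv x 16) 16 := by
          simp
          exact Int.emod_nonneg _ (by norm_num)
        have h2 : 0 ≤ PySem.Int.mod x 16 := by
          simp
          exact Int.emod_nonneg _ (by norm_num)
        omega
    exact key data_bytes 0 le_rfl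
  set s := data_bytes.foldl (fun acc b => acc + (PySem.Int.mod (PySem.Int.floordiv b 16) 16 + PySem.Int.mod b 16)) 0 with hs
  by_cases h : 22 - s < 0 ∨ 22 - s > 30
  · rw [if_pos h, if_pos h]
  · rw [if_neg h, if_neg h, tail_eq (22 - s) (by omega) (by omega)]
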